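-- pv_equiv track=rewrite | github.com/JakobEichmann/PdF | type-rule-synthesis/python-pipeline/prompt_builder.py | _strip_block_comments_except_annotation_spec
-- ===== SOURCE A (Python) =====
-- from typing import Optional, Dict, List, Set
--
-- def _strip_block_comments_except_annotation_spec(code: str) -> str:
--     """
--     Remove all block comments from the code except the annotation spec
--     itself.  This prevents the expected‑result text from leaking into
--     the language model prompt.  The annotation spec is preserved to
--     provide the formal refinement type definition.
--     """
--     out: List[str] = []
--     i = 0
--     n = len(code)
--     while i < n:
--         j = code.find("/*", i)
--         if j == -1:
--             out.append(code[i:])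
--             break
--         out.append(code[i:j])
--         k = code.find("*/", j + 2)
--         if k == -1:
--             break
--         block = code[j:k + 2]
--         if "annotation " in block:
--             out.append(block)
--         i = k + 2
--     return "".join(out)
-- ===== SOURCE B (Python) =====
-- def _strip_block_comments_except_annotation_spec(code: str) -> str:
--     # One-pass character state machine: outside a comment, copy chars;
--     # inside, buffer the comment and emit it only if it contains 'annotation '.
--     # An unterminated comment is dropped (everything from its '/*' onward).
--     res = []
--     com = None  # None = outside a comment; else list of chars of the open comment
--     i = 0
--     n = len(code)
--     while i < n:
--         two = code[i:i + 2]
--         if com is None: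
--             if two == "/*":
--                 com = ["/", "*"]
--                 i += 2
--             else:
--                 res.append(code[i])
--                 i += 1
--         else:
--             if two == "*/":
--                 com.append("*/")
--                 block = "".join(com)
--                 if "annotation " in block:
--                     res.append(block)
--                 com = None
--                 i += 2
--             else:
--                 com.append(code[i])
--                 i += 1
--     return "".join(res)
-- ===== Notes on version B (the rewrite author's own statement) =====
-- stated objective: alternative
-- what changed: Replaced the repeated str.find/slice scanning loop with a single left-to-right character state machine that buffers the current comment and emits it only when it contains the annotation marker.
import Mathlib
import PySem

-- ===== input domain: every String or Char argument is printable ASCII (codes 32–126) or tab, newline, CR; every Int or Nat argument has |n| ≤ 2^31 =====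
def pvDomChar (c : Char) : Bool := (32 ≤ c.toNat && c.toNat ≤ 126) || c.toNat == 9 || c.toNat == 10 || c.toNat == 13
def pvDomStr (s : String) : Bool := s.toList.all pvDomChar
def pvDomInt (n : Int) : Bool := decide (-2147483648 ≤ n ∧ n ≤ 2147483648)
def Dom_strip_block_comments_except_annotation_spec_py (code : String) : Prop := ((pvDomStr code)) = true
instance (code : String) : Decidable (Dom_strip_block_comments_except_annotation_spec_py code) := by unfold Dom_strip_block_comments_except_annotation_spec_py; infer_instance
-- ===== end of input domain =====

-- B replaces A's find/slice scanning loop by a one-pass character state machine; same cost, different structure ("alternative").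

def annChars : List Char := ['a','n','n','o','t','a','t','i','o','n',' ']

-- ===== PORT A =====
-- A's while-loop over an index i, transliterated over the remaining suffix s = code[i:]
-- (each iteration of A only reads code from i on; finds on code from i / j+2 become finds on the suffix,
-- and appends to the out list become appends to a char accumulator, joined at the end).
def stripALoop (s : List Char) (out : List Char) : List Char :=
  match s with
  | [] => out                                     -- while i < n fails
  | c :: tl =>
    let s := c :: tl
    let j := PySem.Chars.find s ['/', '*']        -- code.find("/*", i)
    if j = -1 then out ++ s                       -- out.append(code[i:]); break
    else
      let out1 := out ++ s.take j.toNat           -- out.append(code[i:j])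
      let rest := s.drop (j.toNat + 2)
      let k := PySem.Chars.find rest ['*', '/']   -- code.find("*/", j+2), relative to rest
      if k = -1 then out1                         -- break
      else
        let block := (s.drop j.toNat).take (k.toNat + 4)   -- code[j:k+2]
        let out2 := if PySem.Chars.isIn annChars block then out1 ++ block else out1
        stripALoop (rest.drop (k.toNat + 2)) out2          -- i = k + 2
termination_by s.length
decreasing_by
  simp only [List.length_drop, List.length_cons]
  omega

def strip_block_comments_except_annotation_spec_py (code : String) : String :=
  String.ofList (stripALoop code.toList [])

-- ===== PORT B =====
-- B's single while-loop: st = none outside a comment, some com inside (com = chars of the open comment).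
def stripBLoop (s : List Char) (st : Option (List Char)) (res : List Char) : List Char :=
  match s, st with
  | [], _ => res                                  -- loop ends; an open comment is dropped
  | c :: rest, none =>
    if c = '/' ∧ rest.head? = some '*' then       -- two == "/*"
      stripBLoop rest.tail (some ['/', '*']) res
    else
      stripBLoop rest none (res ++ [c])
  | c :: rest, some com =>
    if c = '*' ∧ rest.head? = some '/' then       -- two == "*/"
      let block := com ++ ['*', '/']
      stripBLoop rest.tail none (if PySem.Chars.isIn annChars block then res ++ block else res)
    else
      stripBLoop rest (some (com ++ [c])) res
termination_by s.length
decreasing_by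
  · simp only [List.length_cons, List.length_tail]; omega
  · simp
  · simp only [List.length_cons, List.length_tail]; omega
  · simp

def strip_block_comments_except_annotation_spec_py_alt (code : String) : String :=
  String.ofList (stripBLoop code.toList none [])

-- ===== PRECONDITION & SPEC =====
def Spec_strip_block_comments_except_annotation_spec_py (code : String) (out : String) : Prop := out = strip_block_comments_except_annotation_spec_py_alt code
instance (code : String) (out : String) : Decidable (Spec_strip_block_comments_except_annotation_spec_py code out) := by unfold Spec_strip_block_comments_except_annotation_spec_py; infer_instance

-- ===== CLAIM (what is proved, stated in full; the proofs are below) =====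
def Claim_equal_strip_block_comments_except_annotation_spec_py : Prop := ∀ (code : String), Dom_strip_block_comments_except_annotation_spec_py code → Spec_strip_block_comments_except_annotation_spec_py code (strip_block_comments_except_annotation_spec_py code)

-- ===== LEMMAS AND PROOFS =====

-- one-step unfoldings of the two loops
theorem stripBLoop_nil (st : Option (List Char)) (res : List Char) :
    stripBLoop [] st res = res := by
  rw [stripBLoop.eq_def]

theorem stripBLoop_none_open (tl res : List Char) :
    stripBLoop ('/' :: '*' :: tl) none res = stripBLoop tl (some ['/', '*']) res := by
  rw [stripBLoop.eq_def]; simp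

theorem stripBLoop_none_step (c : Char) (rest res : List Char)
    (h : ¬ (c = '/' ∧ rest.head? = some '*')) :
    stripBLoop (c :: rest) none res = stripBLoop rest none (res ++ [c]) := by
  rw [stripBLoop.eq_def]; simp only; rw [if_neg h]

theorem stripBLoop_some_close (tl com res : List Char) :
    stripBLoop ('*' :: '/' :: tl) (some com) res =
      stripBLoop tl none
        (if PySem.Chars.isIn annChars (com ++ ['*', '/']) then res ++ com ++ ['*', '/'] else res) := by
  rw [stripBLoop.eq_def]; simp [List.append_assoc]

theorem stripBLoop_some_step (c : Char) (rest com res : List Char)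
    (h : ¬ (c = '*' ∧ rest.head? = some '/')) :
    stripBLoop (c :: rest) (some com) res = stripBLoop rest (some (com ++ [c])) res := by
  rw [stripBLoop.eq_def]; simp only; rw [if_neg h]

-- from "no prefix here" to "the machine's two-char test fails here"
theorem not_two_test {a b : Char} (c : Char) (rest : List Char)
    (h : ¬ [a, b] <+: (c :: rest)) : ¬ (c = a ∧ rest.head? = some b) := by
  intro ⟨hc, hh⟩
  apply h
  cases rest with
  | nil => simp at hh
  | cons d t =>
    simp at hh
    exact ⟨t, by simp [hc, hh]⟩

-- text mode, no "/*" anywhere: the machine copies everything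
theorem stripB_no_open (s : List Char) (res : List Char)
    (h : ∀ i, ¬ ['/', '*'] <+: s.drop i) : stripBLoop s none res = res ++ s := by
  induction s generalizing res with
  | nil => simp [stripBLoop_nil]
  | cons c rest ih =>
    rw [stripBLoop_none_step c rest res (not_two_test c rest (by simpa using h 0)),
        ih (res ++ [c]) (fun i => by simpa using h (i + 1))]
    simp

-- comment mode, no "*/" anywhere: the open comment is dropped
theorem stripB_no_close (t : List Char) (com res : List Char)
    (h : ∀ i, ¬ ['*', '/'] <+: t.drop i) : stripBLoop t (some com) res = res := by
  induction t generalizing com with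
  | nil => exact stripBLoop_nil _ _
  | cons c rest ih =>
    rw [stripBLoop_some_step c rest com res (not_two_test c rest (by simpa using h 0))]
    exact ih (com ++ [c]) (fun i => by simpa using h (i + 1))

-- text mode, first "/*" at position j: the machine copies s.take j and enters comment mode
theorem stripB_open (j : Nat) (s res : List Char)
    (h1 : ['/', '*'] <+: s.drop j) (h2 : ∀ i < j, ¬ ['/', '*'] <+: s.drop i) :
    stripBLoop s none res = stripBLoop (s.drop (j + 2)) (some ['/', '*']) (res ++ s.take j) := by
  induction j generalizing s res with
  | zero =>
    simp only [List.drop_zero] at h1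
    obtain ⟨tl, rfl⟩ := h1
    simp only [List.cons_append, List.nil_append]
    rw [stripBLoop_none_open]
    simp
  | succ j ih =>
    cases s with
    | nil => simp at h1
    | cons c rest =>
      rw [stripBLoop_none_step c rest res (not_two_test c rest (by simpa using h2 0 (by omega))),
          ih rest (res ++ [c]) (by simpa using h1) (fun i hi => by simpa using h2 (i + 1) (by omega))]
      simp

-- comment mode, first "*/" at position k: the comment closes as com ++ t.take k ++ "*/"
theorem stripB_close (k : Nat) (t com res : List Char)
    (h1 : ['*', '/'] <+: t.drop k) (h2 : ∀ i < k, ¬ ['*', '/'] <+: t.drop i) :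
    stripBLoop t (some com) res =
      stripBLoop (t.drop (k + 2)) none
        (if PySem.Chars.isIn annChars (com ++ t.take k ++ ['*', '/'])
         then res ++ com ++ t.take k ++ ['*', '/'] else res) := by
  induction k generalizing t com res with
  | zero =>
    simp only [List.drop_zero] at h1
    obtain ⟨tl, rfl⟩ := h1
    simp only [List.cons_append, List.nil_append]
    rw [stripBLoop_some_close]
    simp
  | succ k ih =>
    cases t with
    | nil => simp at h1
    | cons c rest =>
      rw [stripBLoop_some_step c rest com res (not_two_test c rest (by simpa using h2 0 (by omega))),
          ih rest (com ++ [c]) res (by simpa using h1) (fun i hi => by simpa using h2 (i + 1) (by omega))]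
      simp [List.append_assoc]

-- A's one-step unfolding, fully inlined
theorem stripALoop_cons (c : Char) (tl out : List Char) :
    stripALoop (c :: tl) out =
      (if PySem.Chars.find (c :: tl) ['/', '*'] = -1 then out ++ (c :: tl)
       else if PySem.Chars.find ((c :: tl).drop ((PySem.Chars.find (c :: tl) ['/', '*']).toNat + 2)) ['*', '/'] = -1 then
         out ++ (c :: tl).take (PySem.Chars.find (c :: tl) ['/', '*']).toNat
       else
         stripALoop
           (((c :: tl).drop ((PySem.Chars.find (c :: tl) ['/', '*']).toNat + 2)).drop
             ((PySem.Chars.find ((c :: tl).drop ((PySem.Chars.find (c :: tl) ['/', '*']).toNat + 2)) ['*', '/']).toNat + 2))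
           (if PySem.Chars.isIn annChars
                (((c :: tl).drop (PySem.Chars.find (c :: tl) ['/', '*']).toNat).take
                  ((PySem.Chars.find ((c :: tl).drop ((PySem.Chars.find (c :: tl) ['/', '*']).toNat + 2)) ['*', '/']).toNat + 4))
            then (out ++ (c :: tl).take (PySem.Chars.find (c :: tl) ['/', '*']).toNat) ++
                 ((c :: tl).drop (PySem.Chars.find (c :: tl) ['/', '*']).toNat).take
                   ((PySem.Chars.find ((c :: tl).drop ((PySem.Chars.find (c :: tl) ['/', '*']).toNat + 2)) ['*', '/']).toNat + 4)
            else out ++ (c :: tl).take (PySem.Chars.find (c :: tl) ['/', '*']).toNat)) := by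
  rw [stripALoop.eq_def]

theorem stripA_eq_stripB (s : List Char) (out : List Char) :
    stripALoop s out = stripBLoop s none out := by
  induction hn : s.length using Nat.strong_induction_on generalizing s out with
  | _ n ih =>
  cases s with
  | nil => rw [stripALoop.eq_def, stripBLoop_nil]
  | cons c0 tl0 =>
    rw [stripALoop_cons]
    set s := c0 :: tl0 with hs
    by_cases hj : PySem.Chars.find s ['/', '*'] = -1
    · rw [if_pos hj, stripB_no_open]
      intro i hpre
      obtain ⟨t, ht⟩ := hpre
      exact (PySem.Chars.find_eq_neg_one_iff s ['/', '*']).mp hj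
        ⟨s.take i, t, by rw [List.append_assoc, ht, List.take_append_drop]⟩
    · rw [if_neg hj]
      have hj0 : 0 ≤ PySem.Chars.find s ['/', '*'] := by
        rcases (PySem.Chars.neg_one_le_find s ['/', '*']).lt_or_eq with h | h
        · omega
        · exact absurd h.symm hj
      obtain ⟨hpre, hmin⟩ := PySem.Chars.find_spec (s := s) (sub := ['/', '*']) hj0
      set jn := (PySem.Chars.find s ['/', '*']).toNat with hjn
      rw [stripB_open jn s out hpre (fun i hi => hmin i hi)]
      set rest := s.drop (jn + 2) with hrest
      by_cases hk : PySem.Chars.find rest ['*', '/'] = -1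
      · rw [if_pos hk, stripB_no_close]
        intro i hp
        obtain ⟨t, ht⟩ := hp
        exact (PySem.Chars.find_eq_neg_one_iff rest ['*', '/']).mp hk
          ⟨rest.take i, t, by rw [List.append_assoc, ht, List.take_append_drop]⟩
      · rw [if_neg hk]
        have hk0 : 0 ≤ PySem.Chars.find rest ['*', '/'] := by
          rcases (PySem.Chars.neg_one_le_find rest ['*', '/']).lt_or_eq with h | h
          · omega
          · exact absurd h.symm hk
        obtain ⟨hkpre, hkmin⟩ := PySem.Chars.find_spec (s := rest) (sub := ['*', '/']) hk0
        set kn := (PySem.Chars.find rest ['*', '/']).toNat with hkn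
        rw [stripB_close kn rest ['/', '*'] _ hkpre (fun i hi => hkmin i hi)]
        -- identify A's block code[j:k+2] with B's reconstructed block
        have hdropJ : s.drop jn = '/' :: '*' :: rest := by
          obtain ⟨tl, htl⟩ := hpre
          have hr : rest = ((s.drop jn).drop 2) := by rw [hrest, List.drop_drop]
          rw [hr, ← htl]
          simp
        have hblock : (s.drop jn).take (kn + 4) = ['/', '*'] ++ rest.take kn ++ ['*', '/'] := by
          rw [hdropJ]
          have htake2 : (rest.drop kn).take 2 = ['*', '/'] := by
            obtain ⟨tl, htl⟩ := hkpre
            rw [← htl]; simp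
          have ht : rest.take (kn + 2) = rest.take kn ++ ['*', '/'] := by
            rw [← htake2, ← List.take_add]
          simp only [List.take_succ_cons]
          rw [ht]
          simp
        rw [hblock]
        have hlen : (rest.drop (kn + 2)).length < n := by
          rw [← hn, hrest, hs]
          simp only [List.length_drop, List.length_cons]
          omega
        rw [ih _ hlen _ _ rfl]
        congr 1
        by_cases hin : PySem.Chars.isIn annChars (['/', '*'] ++ rest.take kn ++ ['*', '/']) = true
        · rw [if_pos hin, if_pos hin]; simp
        · rw [if_neg hin, if_neg hin]

-- ===== VERDICT (by name: the statement is the Claim_ definition above) =====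
theorem strip_block_comments_except_annotation_spec_py_spec : Claim_equal_strip_block_comments_except_annotation_spec_py := by
  intro code _
  unfold Spec_strip_block_comments_except_annotation_spec_py
  unfold strip_block_comments_except_annotation_spec_py strip_block_comments_except_annotation_spec_py_alt
  rw [stripA_eq_stripB]
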